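-- pv_equiv track=rewrite | github.com/ginaclepper/scansion | GOOGLE/q2.py | solution
-- ===== SOURCE A (Python) =====
-- def solution(S):
--     # Special case:
--     if len(S) == 2:
--         return 1
--     num_valid_splits = 0
--     # Initialize right letters to nothing
--     right_letters = []
--     # Initialize left letters to letters of entire string
--     # Use dict to store *left-most* index of the letter so you know when to remove it
--     left_letters = {}
--     left_letter_keys = set(S)
--     for key in left_letter_keys:
--         left_letters[key] = S.find(key)
--     # Count number of unique letters in each
--     right_num = 0
--     left_num = len(left_letter_keys)
--     # split_idx is before corresponding char
--     for split_idx in range(len(S) - 1, 0, -1): # Really len(S)-1 to 1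
--         # Each move of split point adds letter to right letters
--         # and removes same letter from left letters
--         letter = S[split_idx]
--         if letter in right_letters:
--             pass
--         else:
--             right_letters.append(letter)
--             right_num = right_num + 1
--         if left_letters[letter] == split_idx: # remove from left_letters
--             del left_letters[letter]
--             left_num = left_num - 1
--         else:
--             pass
--         if right_num == left_num:
--             num_valid_splits = num_valid_splits + 1
--     return num_valid_splits
-- ===== SOURCE B (Python) =====
-- def solution(S):
--     n = len(S)
--     pref = []
--     seen = set()
--     for c in S:
--         seen.add(c)
--         pref.append(len(seen))
--     suf = []
--     seen = set()
--     for c in reversed(S):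
--         seen.add(c)
--         suf.append(len(seen))
--     return sum(1 for i in range(1, n) if pref[i - 1] == suf[n - 1 - i])
-- ===== Notes on version B (the rewrite author's own statement) =====
-- stated objective: alternative
-- what changed: A walks the split point backwards maintaining a right-letters list (membership scan per step) and a dict of first-occurrence indices; B instead computes prefix and suffix distinct-letter counts in two forward passes over a seen-set and counts the positions where they are equal.
import Mathlib
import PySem

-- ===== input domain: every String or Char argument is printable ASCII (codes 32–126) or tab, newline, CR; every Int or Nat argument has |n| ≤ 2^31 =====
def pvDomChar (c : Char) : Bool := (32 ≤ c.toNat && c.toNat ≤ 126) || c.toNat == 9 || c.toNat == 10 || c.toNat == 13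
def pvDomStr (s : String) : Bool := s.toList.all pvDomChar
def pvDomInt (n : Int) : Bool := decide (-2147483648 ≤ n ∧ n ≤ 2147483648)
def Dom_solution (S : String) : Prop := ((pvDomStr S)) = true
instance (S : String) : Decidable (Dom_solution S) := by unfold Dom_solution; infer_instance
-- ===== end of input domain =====

-- B replaces A's backward sweep (inner list-membership scan + a first-index dict) by two
-- linear prefix/suffix distinct-count passes; same return value on every string.

-- ===== PORT A =====
-- one iteration of A's backward loop over split_idx; state = (num_valid_splits, right_letters, right_num, left_letters, left_num)
def solStep (cs : List Char) (st : Int × List Char × Int × PySem.Dict Char Int × Int)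
    (splitIdx : Int) : Int × List Char × Int × PySem.Dict Char Int × Int :=
  let (count, rl, rn, ll, ln) := st
  let letter := PySem.List.pyGetD cs splitIdx ' '   -- S[split_idx]; 1 ≤ split_idx < len(S), always in range
  let (rl, rn) := if rl.contains letter then (rl, rn) else (rl ++ [letter], rn + 1)
  -- left_letters[letter]: the key is always present here (letter occurs at splitIdx ≥ 1 and a
  -- key is deleted only at its first-occurrence index), so getD with default -1 is exact
  let (ll, ln) := if ll.getD letter (-1) = splitIdx then (ll.erase letter, ln - 1) else (ll, ln)
  let count := if rn = ln then count + 1 else count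
  (count, rl, rn, ll, ln)

def solution (S : String) : Int :=
  let cs := S.toList
  if cs.length = 2 then 1 else
  let leftKeys : PySem.Set Char := PySem.Set.ofList cs
  -- the dict built by iterating set(S) is only looked up afterwards, so set order cannot matter
  let ll0 : PySem.Dict Char Int :=
    leftKeys.foldl (fun d key => d.insert key (PySem.Chars.find cs [key])) PySem.Dict.empty
  let st := (PySem.List.pyRange ((cs.length : Int) - 1) 0 (-1)).foldl (solStep cs)
      (0, [], 0, ll0, (PySem.Set.len leftKeys : Int))
  st.1

-- ===== PORT B =====
-- one iteration of B's distinct-count pass: add the next char to seen, append len(seen)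
def distStep (p : List Int × PySem.Set Char) (c : Char) : List Int × PySem.Set Char :=
  let seen := PySem.Set.add p.2 c
  (p.1 ++ [(PySem.Set.len seen : Int)], seen)

def solution_alt (S : String) : Int :=
  let cs := S.toList
  let n : Int := cs.length
  let pref := (cs.foldl distStep ([], PySem.Set.empty)).1
  let suf := (cs.reverse.foldl distStep ([], PySem.Set.empty)).1
  ((PySem.List.pyRange 1 n 1).map (fun i =>
      if PySem.List.pyGetD pref (i - 1) 0 = PySem.List.pyGetD suf (n - 1 - i) 0
      then (1 : Int) else 0)).sum

-- ===== PRECONDITION & SPEC =====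
def Spec_solution (S : String) (out : Int) : Prop := out = solution_alt S
instance (S : String) (out : Int) : Decidable (Spec_solution S out) := by unfold Spec_solution; infer_instance

-- ===== CLAIM (what is proved, stated in full; the proofs are below) =====
def Claim_equal_solution : Prop := ∀ (S : String), Dom_solution S → Spec_solution S (solution S)

-- ===== LEMMAS AND PROOFS =====

-- number of distinct characters of a list
def dcount (l : List Char) : Nat := (PySem.Set.ofList l).length

-- number of valid splits j with k < j < cs.length (the splits still to be counted once
-- A's loop has processed every split_idx > k); the common specification of both programs
def cntAbove (cs : List Char) (k : Nat) : Int :=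
  (((List.range cs.length).drop (k + 1)).countP
      (fun j => decide (dcount (cs.take j) = dcount (cs.drop j))) : Nat)

-- the invariant of A's loop once every split_idx > k has been processed
def InvA (cs : List Char) (k : Nat) (st : Int × List Char × Int × PySem.Dict Char Int × Int) : Prop :=
  st.1 = cntAbove cs k ∧
  st.2.1.Nodup ∧ (∀ x, x ∈ st.2.1 ↔ x ∈ cs.drop (k + 1)) ∧
  st.2.2.1 = (st.2.1.length : Int) ∧
  (∀ x, st.2.2.2.1.get? x = if x ∈ cs.take (k + 1) then some (PySem.Chars.find cs [x]) else none) ∧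
  st.2.2.2.2 = (dcount (cs.take (k + 1)) : Int)

lemma dcount_eq_card (l : List Char) : dcount l = l.toFinset.card := by
  rw [dcount, ← List.toFinset_card_of_nodup (PySem.Set.nodup_ofList l)]
  congr 1; ext x; simp [PySem.Set.mem_ofList]

lemma dcount_reverse (l : List Char) : dcount l.reverse = dcount l := by
  simp [dcount_eq_card]

lemma dcount_append_singleton (l : List Char) (a : Char) :
    dcount (l ++ [a]) = if a ∈ l then dcount l else dcount l + 1 := by
  simp only [dcount_eq_card, List.toFinset_append]
  by_cases h : a ∈ l
  · simp [h, Finset.union_eq_left.mpr, Finset.singleton_subset_iff.mpr, List.mem_toFinset.mpr h]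
  · rw [if_neg h]
    rw [show l.toFinset ∪ [a].toFinset = insert a l.toFinset by simp]
    rw [Finset.card_insert_of_notMem (by simp [h])]

lemma dcount_cons (a : Char) (l : List Char) :
    dcount (a :: l) = if a ∈ l then dcount l else dcount l + 1 := by
  simp only [dcount_eq_card, List.toFinset_cons]
  by_cases h : a ∈ l
  · simp [h, Finset.insert_eq_self.mpr (List.mem_toFinset.mpr h)]
  · rw [if_neg h, Finset.card_insert_of_notMem (by simp [h])]

lemma len_eq_dcount (l m : List Char) (hnd : l.Nodup) (hm : ∀ x, x ∈ l ↔ x ∈ m) :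
    l.length = dcount m := by
  rw [dcount_eq_card, ← List.toFinset_card_of_nodup hnd]
  congr 1; ext x; simp [hm]

lemma findgo_single (x : Char) : ∀ (l : List Char) (k : Nat), x ∈ l →
    ∃ j : Nat, PySem.Chars.find.go [x] l k = ((k + j : Nat) : Int) ∧
      l[j]? = some x ∧ x ∉ l.take j := by
  intro l
  induction l with
  | nil => intro k h; simp at h
  | cons h t ih =>
    intro k hm
    by_cases hx : x = h
    · refine ⟨0, ?_, by simp [hx], by simp⟩
      subst hx
      simp [PySem.Chars.find.go, List.isPrefixOf]
    · have hmt : x ∈ t := by cases List.mem_cons.mp hm with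
        | inl h' => exact absurd h' hx
        | inr h' => exact h'
      obtain ⟨j, hgo, hget, htake⟩ := ih (k + 1) hmt
      refine ⟨j + 1, ?_, by simpa using hget, ?_⟩
      · rw [show PySem.Chars.find.go [x] (h :: t) k = PySem.Chars.find.go [x] t (k + 1) by
          simp only [PySem.Chars.find.go, List.isPrefixOf, Bool.and_true]
          rw [if_neg (by simp; intro hc; exact absurd hc hx)]]
        rw [hgo]; push_cast; ring
      · intro hc
        rcases List.mem_cons.mp (by simpa [List.take_succ_cons] using hc) with h' | h'
        · exact hx h'
        · exact htake h'

lemma find_single_eq_iff (cs : List Char) (x : Char) (i : Nat)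
    (h : cs[i]? = some x) :
    PySem.Chars.find cs [x] = (i : Int) ↔ x ∉ cs.take i := by
  have hi : i < cs.length := by
    by_contra hc
    simp [List.getElem?_eq_none (le_of_not_gt hc)] at h
  have hmem : x ∈ cs := by
    have := List.getElem?_eq_some_iff.mp h
    obtain ⟨hlt, he⟩ := this
    exact he ▸ List.getElem_mem hlt
  obtain ⟨j, hgo, hget, htake⟩ := findgo_single x cs 0 hmem
  have hfind : PySem.Chars.find cs [x] = (j : Int) := by
    rw [PySem.Chars.find, hgo]; simp
  rw [hfind]
  constructor
  · intro he
    have : j = i := by exact_mod_cast he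
    exact this ▸ htake
  · intro hni
    have hji : j = i := by
      rcases lt_trichotomy j i with hlt | heq | hgt
      · exact absurd (List.mem_take_iff_getElem.mpr
          ⟨j, by simp; omega, by simpa using (List.getElem?_eq_some_iff.mp hget).2⟩) hni
      · exact heq
      · exact absurd (List.mem_take_iff_getElem.mpr
          ⟨i, by simp; omega, by simpa using (List.getElem?_eq_some_iff.mp h).2⟩) htake
    exact_mod_cast congrArg (Nat.cast : Nat → Int) hji

lemma foldl_insert_get? (ks : List Char) (f : Char → Int) (d : PySem.Dict Char Int) (x : Char) :
    (ks.foldl (fun d k => d.insert k (f k)) d).get? x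
      = if x ∈ ks then some (f x) else d.get? x := by
  induction ks generalizing d with
  | nil => simp
  | cons k ks ih =>
    simp only [List.foldl_cons, ih, List.mem_cons, PySem.Dict.get?_insert]
    by_cases hks : x ∈ ks
    · simp [hks]
    · by_cases hk : x = k <;> simp [hks, hk]

lemma find?_filter_ne (k x : Char) (l : List (Char × Int)) (hxk : x ≠ k) :
    (l.filter (fun p => !p.1 == k)).find? (fun p => p.1 == x) = l.find? (fun p => p.1 == x) := by
  induction l with
  | nil => rfl
  | cons p rest ih =>
    by_cases hpk : p.1 = k
    · rw [List.filter_cons_of_neg (by simp [hpk]), ih,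
        List.find?_cons_of_neg (by simp [hpk]; exact fun h => hxk (h ▸ hpk.symm ▸ rfl))]
    · rw [List.filter_cons_of_pos (by simp [hpk])]
      by_cases hpx : p.1 = x
      · rw [List.find?_cons_of_pos (by simp [hpx]), List.find?_cons_of_pos (by simp [hpx])]
      · rw [List.find?_cons_of_neg (by simp [hpx]), List.find?_cons_of_neg (by simp [hpx]), ih]

lemma get?_erase (d : PySem.Dict Char Int) (k x : Char) :
    (d.erase k).get? x = if x = k then none else d.get? x := by
  rcases d with ⟨items⟩
  by_cases hxk : x = k
  · subst hxk
    simp only [PySem.Dict.erase, PySem.Dict.get?]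
    rw [List.find?_eq_none.mpr (by intro p hp; simp at hp ⊢; exact hp.2)]
    rfl
  · simp only [PySem.Dict.erase, PySem.Dict.get?, if_neg hxk]
    rw [find?_filter_ne k x items hxk]

lemma cntAbove_step (cs : List Char) (k : Nat) (hk : k + 1 < cs.length) :
    cntAbove cs k =
      (if dcount (cs.take (k + 1)) = dcount (cs.drop (k + 1)) then 1 else 0) + cntAbove cs (k + 1) := by
  unfold cntAbove
  rw [List.drop_eq_getElem_cons (by simpa using hk)]
  rw [List.countP_cons]
  simp only [List.getElem_range]
  by_cases h : dcount (cs.take (k + 1)) = dcount (cs.drop (k + 1))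
  · simp [h]; ring
  · simp [h]

lemma distFold : ∀ (l : List Char) (acc : List Int) (s : PySem.Set Char),
    l.foldl distStep (acc, s) =
      (acc ++ (List.range l.length).map (fun t => ((s.update (l.take (t + 1))).length : Int)),
       s.update l) := by
  intro l
  induction l with
  | nil => simp [PySem.Set.update_nil]
  | cons c t ih =>
    intro acc s
    rw [List.foldl_cons]
    show t.foldl distStep (acc ++ [(PySem.Set.len (s.add c) : Int)], s.add c) = _
    rw [ih]
    refine Prod.ext ?_ (by simp [PySem.Set.update_cons])
    simp only [List.length_cons, List.range_succ_eq_map, List.map_cons, List.map_map]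
    simp only [List.append_assoc]
    congr 1

lemma stepInv (cs : List Char) (k : Nat) (st : Int × List Char × Int × PySem.Dict Char Int × Int)
    (hk : k + 1 < cs.length) (h : InvA cs (k + 1) st) :
    InvA cs k (solStep cs st ((k + 1 : Nat) : Int)) := by
  obtain ⟨count, rl, rn, ll, ln⟩ := st
  obtain ⟨hc, hnd, hmem, hrn, hll, hln⟩ := h
  simp only at hc hnd hmem hrn hll hln
  have hget : PySem.List.pyGetD cs ((k + 1 : Nat) : Int) ' ' = cs[k + 1]'hk := by
    rw [PySem.List.pyGetD_natCast, List.getD_eq_getElem cs ' ' hk]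
  set letter := cs[k + 1]'hk with hletter
  have hgetsome : cs[k + 1]? = some letter := List.getElem?_eq_some_iff.mpr ⟨hk, rfl⟩
  have hdrop : cs.drop (k + 1) = letter :: cs.drop (k + 2) := List.drop_eq_getElem_cons hk
  have htake : cs.take (k + 2) = cs.take (k + 1) ++ [letter] := by
    rw [List.take_add_one, hgetsome]; rfl
  have hlettake2 : letter ∈ cs.take (k + 2) := by rw [htake]; simp
  have hlookup : (ll.getD letter (-1) = ((k + 1 : Nat) : Int)) ↔ letter ∉ cs.take (k + 1) := by
    rw [PySem.Dict.getD_eq_get?_getD, hll letter, if_pos hlettake2, Option.getD_some]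
    exact find_single_eq_iff cs letter (k + 1) hgetsome
  have hrlen : rl.length = dcount (cs.drop (k + 2)) := len_eq_dcount rl _ hnd hmem
  by_cases hrmem : letter ∈ rl
  all_goals by_cases hfirst : letter ∉ cs.take (k + 1)
  · -- letter already on the right, first occurrence of letter is at split_idx
    have hdD : dcount (cs.drop (k + 1)) = dcount (cs.drop (k + 2)) := by
      rw [hdrop, dcount_cons, if_pos ((hmem letter).mp hrmem)]
    have hdT : dcount (cs.take (k + 2)) = dcount (cs.take (k + 1)) + 1 := by
      rw [htake, dcount_append_singleton, if_neg hfirst]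
    have hstep : solStep cs (count, rl, rn, ll, ln) ((k + 1 : Nat) : Int) =
        ((if rn = ln - 1 then count + 1 else count), rl, rn, ll.erase letter, ln - 1) := by
      simp only [solStep, hget]
      rw [if_pos (List.contains_iff_mem.mpr hrmem), if_pos (hlookup.mpr hfirst)]
    rw [hstep]
    have hcond : (rn = ln - 1) ↔ (dcount (cs.take (k + 1)) = dcount (cs.drop (k + 1))) := by
      rw [hrn, hln, hrlen, hdT, hdD]; constructor <;> intro h' <;> omega
    refine ⟨?_, hnd, ?_, hrn, ?_, ?_⟩
    · show (if rn = ln - 1 then count + 1 else count) = cntAbove cs k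
      rw [if_congr hcond rfl rfl, cntAbove_step cs k hk, hc]; split_ifs <;> omega
    · intro x
      rw [hdrop, List.mem_cons, ← hmem x]
      exact ⟨Or.inr, by rintro (rfl | h'); exacts [hrmem, h']⟩
    · intro x
      rw [get?_erase]
      by_cases hx : x = letter
      · subst hx; rw [if_pos rfl, if_neg hfirst]
      · rw [if_neg hx, hll x, htake]
        simp only [List.mem_append, List.mem_singleton, hx, or_false]
    · show ln - 1 = (dcount (cs.take (k + 1)) : Int)
      rw [hln, hdT]; push_cast; ring
  · -- letter already on the right, letter also occurs before split_idx
    rw [not_not] at hfirst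
    have hdD : dcount (cs.drop (k + 1)) = dcount (cs.drop (k + 2)) := by
      rw [hdrop, dcount_cons, if_pos ((hmem letter).mp hrmem)]
    have hdT : dcount (cs.take (k + 2)) = dcount (cs.take (k + 1)) := by
      rw [htake, dcount_append_singleton, if_pos hfirst]
    have hstep : solStep cs (count, rl, rn, ll, ln) ((k + 1 : Nat) : Int) =
        ((if rn = ln then count + 1 else count), rl, rn, ll, ln) := by
      simp only [solStep, hget]
      rw [if_pos (List.contains_iff_mem.mpr hrmem),
        if_neg (fun hc' => (hlookup.mp hc') hfirst)]
    rw [hstep]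
    have hcond : (rn = ln) ↔ (dcount (cs.take (k + 1)) = dcount (cs.drop (k + 1))) := by
      rw [hrn, hln, hrlen, hdT, hdD]; constructor <;> intro h' <;> omega
    refine ⟨?_, hnd, ?_, hrn, ?_, ?_⟩
    · show (if rn = ln then count + 1 else count) = cntAbove cs k
      rw [if_congr hcond rfl rfl, cntAbove_step cs k hk, hc]; split_ifs <;> omega
    · intro x
      rw [hdrop, List.mem_cons, ← hmem x]
      exact ⟨Or.inr, by rintro (rfl | h'); exacts [hrmem, h']⟩
    · intro x
      rw [hll x]
      refine if_congr ?_ rfl rfl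
      rw [htake, List.mem_append, List.mem_singleton]
      exact ⟨by rintro (h' | rfl); exacts [h', hfirst], Or.inl⟩
    · show ln = (dcount (cs.take (k + 1)) : Int)
      rw [hln, hdT]
  · -- letter new on the right, first occurrence at split_idx
    have hnr : letter ∉ cs.drop (k + 2) := fun h' => hrmem ((hmem letter).mpr h')
    have hdD : dcount (cs.drop (k + 1)) = dcount (cs.drop (k + 2)) + 1 := by
      rw [hdrop, dcount_cons, if_neg hnr]
    have hdT : dcount (cs.take (k + 2)) = dcount (cs.take (k + 1)) + 1 := by
      rw [htake, dcount_append_singleton, if_neg hfirst]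
    have hstep : solStep cs (count, rl, rn, ll, ln) ((k + 1 : Nat) : Int) =
        ((if rn + 1 = ln - 1 then count + 1 else count), rl ++ [letter], rn + 1,
          ll.erase letter, ln - 1) := by
      simp only [solStep, hget]
      rw [if_neg (fun hc' => hrmem (List.contains_iff_mem.mp hc')), if_pos (hlookup.mpr hfirst)]
    rw [hstep]
    have hcond : (rn + 1 = ln - 1) ↔ (dcount (cs.take (k + 1)) = dcount (cs.drop (k + 1))) := by
      rw [hrn, hln, hrlen, hdT, hdD]; constructor <;> intro h' <;> omega
    refine ⟨?_, ?_, ?_, ?_, ?_, ?_⟩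
    · show (if rn + 1 = ln - 1 then count + 1 else count) = cntAbove cs k
      rw [if_congr hcond rfl rfl, cntAbove_step cs k hk, hc]; split_ifs <;> omega
    · show (rl ++ [letter]).Nodup
      simp only [List.nodup_append, List.nodup_singleton, hnd, true_and]
      intro b hb c hc
      rw [List.mem_singleton] at hc
      subst hc
      exact fun h' => hrmem (h' ▸ hb)
    · intro x
      show x ∈ rl ++ [letter] ↔ _
      rw [List.mem_append, hmem x, hdrop, List.mem_cons]
      simp [or_comm]
    · show rn + 1 = ((rl ++ [letter]).length : Int)
      rw [hrn]; simp [List.length_append]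
    · intro x
      show (ll.erase letter).get? x = _
      rw [get?_erase]
      by_cases hx : x = letter
      · subst hx; rw [if_pos rfl, if_neg hfirst]
      · rw [if_neg hx, hll x, htake]
        simp only [List.mem_append, List.mem_singleton, hx, or_false]
    · show ln - 1 = (dcount (cs.take (k + 1)) : Int)
      rw [hln, hdT]; push_cast; ring
  · -- letter new on the right, letter also occurs before split_idx
    rw [not_not] at hfirst
    have hnr : letter ∉ cs.drop (k + 2) := fun h' => hrmem ((hmem letter).mpr h')
    have hdD : dcount (cs.drop (k + 1)) = dcount (cs.drop (k + 2)) + 1 := by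
      rw [hdrop, dcount_cons, if_neg hnr]
    have hdT : dcount (cs.take (k + 2)) = dcount (cs.take (k + 1)) := by
      rw [htake, dcount_append_singleton, if_pos hfirst]
    have hstep : solStep cs (count, rl, rn, ll, ln) ((k + 1 : Nat) : Int) =
        ((if rn + 1 = ln then count + 1 else count), rl ++ [letter], rn + 1, ll, ln) := by
      simp only [solStep, hget]
      rw [if_neg (fun hc' => hrmem (List.contains_iff_mem.mp hc')),
        if_neg (fun hc' => (hlookup.mp hc') hfirst)]
    rw [hstep]
    have hcond : (rn + 1 = ln) ↔ (dcount (cs.take (k + 1)) = dcount (cs.drop (k + 1))) := by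
      rw [hrn, hln, hrlen, hdT, hdD]; constructor <;> intro h' <;> omega
    refine ⟨?_, ?_, ?_, ?_, ?_, ?_⟩
    · show (if rn + 1 = ln then count + 1 else count) = cntAbove cs k
      rw [if_congr hcond rfl rfl, cntAbove_step cs k hk, hc]; split_ifs <;> omega
    · show (rl ++ [letter]).Nodup
      simp only [List.nodup_append, List.nodup_singleton, hnd, true_and]
      intro b hb c hc
      rw [List.mem_singleton] at hc
      subst hc
      exact fun h' => hrmem (h' ▸ hb)
    · intro x
      show x ∈ rl ++ [letter] ↔ _
      rw [List.mem_append, hmem x, hdrop, List.mem_cons]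
      simp [or_comm]
    · show rn + 1 = ((rl ++ [letter]).length : Int)
      rw [hrn]; simp [List.length_append]
    · intro x
      rw [hll x]
      refine if_congr ?_ rfl rfl
      rw [htake, List.mem_append, List.mem_singleton]
      exact ⟨by rintro (h' | rfl); exacts [h', hfirst], Or.inl⟩
    · show ln = (dcount (cs.take (k + 1)) : Int)
      rw [hln, hdT]

lemma foldInv (cs : List Char) : ∀ (k : Nat) (st : Int × List Char × Int × PySem.Dict Char Int × Int),
    k < cs.length → InvA cs k st →
    ((PySem.List.pyRange (k : Int) 0 (-1)).foldl (solStep cs) st).1 = cntAbove cs 0 := by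
  intro k
  induction k with
  | zero =>
    intro st _ h
    rw [Nat.cast_zero, PySem.List.pyRange_neg_one_eq_nil le_rfl]
    exact h.1
  | succ k ih =>
    intro st hlt h
    rw [show ((k + 1 : Nat) : Int) = (k : Int) + 1 by push_cast; ring,
      PySem.List.pyRange_neg_one_cons (by positivity), List.foldl_cons]
    have h1 : ((k : Int) + 1 - 1) = (k : Int) := by ring
    rw [h1]
    have hstep := stepInv cs k st hlt (by exact h)
    rw [show ((k + 1 : Nat) : Int) = (k : Int) + 1 by push_cast; ring] at hstep
    exact ih (solStep cs st ((k : Int) + 1)) (by omega) hstep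

lemma A_eq_cnt (S : String) : solution S = cntAbove S.toList 0 := by
  unfold solution
  set cs := S.toList with hcs
  by_cases h2 : cs.length = 2
  · rw [if_pos h2]
    obtain ⟨a, b, hab⟩ := List.length_eq_two.mp h2
    rw [hab]
    unfold cntAbove
    norm_num [List.range_succ, dcount]
    rfl
  · rw [if_neg h2]
    rcases Nat.eq_zero_or_pos cs.length with h0 | h0
    · rw [show ((cs.length : Int) - 1) = -1 by rw [h0]; ring,
        PySem.List.pyRange_neg_one_eq_nil (by norm_num)]
      show (0 : Int) = cntAbove cs 0
      unfold cntAbove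
      rw [List.length_eq_zero_iff.mp h0]
      simp
    · have hcast : ((cs.length : Int) - 1) = ((cs.length - 1 : Nat) : Int) := by
        push_cast [h0]; ring
      rw [hcast]
      apply foldInv cs (cs.length - 1) _ (by omega)
      have hsucc : cs.length - 1 + 1 = cs.length := by omega
      refine ⟨?_, List.nodup_nil, ?_, rfl, ?_, ?_⟩
      · show (0 : Int) = cntAbove cs (cs.length - 1)
        unfold cntAbove
        rw [hsucc, show List.drop cs.length (List.range cs.length) = [] from by simp]
        simp
      · intro x
        rw [hsucc, List.drop_length]
      · intro x
        rw [foldl_insert_get?, hsucc, List.take_length]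
        by_cases hx : x ∈ cs
        · rw [if_pos ((PySem.Set.mem_ofList cs x).mpr hx), if_pos hx]
        · rw [if_neg (fun hc => hx ((PySem.Set.mem_ofList cs x).mp hc)), if_neg hx,
            PySem.Dict.get?_empty]
      · show (PySem.Set.len (PySem.Set.ofList cs) : Int) = _
        rw [hsucc, List.take_length]
        rfl

lemma B_eq_cnt (S : String) : solution_alt S = cntAbove S.toList 0 := by
  unfold solution_alt
  dsimp only
  set cs := S.toList with hcs
  rcases Nat.eq_zero_or_pos cs.length with h0 | h0
  · rw [List.length_eq_zero_iff.mp h0]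
    unfold cntAbove
    norm_num [PySem.List.pyRange_one]
  -- rewrite the two passes into explicit prefix/suffix distinct-count tables
  have hpref : (cs.foldl distStep ([], PySem.Set.empty)).1
      = (List.range cs.length).map (fun t => ((dcount (cs.take (t + 1))) : Int)) := by
    rw [distFold cs [] PySem.Set.empty]
    simp only [List.nil_append]
    apply List.map_congr_left
    intro t _
    rw [show PySem.Set.update PySem.Set.empty (cs.take (t + 1))
        = PySem.Set.ofList (cs.take (t + 1)) from PySem.Set.update_empty _]
    rfl
  have hsuf : (cs.reverse.foldl distStep ([], PySem.Set.empty)).1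
      = (List.range cs.length).map (fun t => ((dcount (cs.reverse.take (t + 1))) : Int)) := by
    rw [distFold cs.reverse [] PySem.Set.empty]
    simp only [List.nil_append, List.length_reverse]
    apply List.map_congr_left
    intro t _
    rw [show PySem.Set.update PySem.Set.empty (cs.reverse.take (t + 1))
        = PySem.Set.ofList (cs.reverse.take (t + 1)) from PySem.Set.update_empty _]
    rfl
  rw [hpref, hsuf, PySem.List.pyRange_one, List.map_map]
  have hlen1 : ((cs.length : Int) - 1).toNat = cs.length - 1 := by omega
  rw [hlen1]
  have hmap : ∀ t ∈ List.range (cs.length - 1),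
      ((fun i => if PySem.List.pyGetD ((List.range cs.length).map
            (fun t => ((dcount (cs.take (t + 1))) : Int))) (i - 1) 0
          = PySem.List.pyGetD ((List.range cs.length).map
            (fun t => ((dcount (cs.reverse.take (t + 1))) : Int))) ((cs.length : Int) - 1 - i) 0
          then (1 : Int) else 0) ∘ (fun k : Nat => (1 : Int) + k)) t
      = if decide (dcount (cs.take (t + 1)) = dcount (cs.drop (t + 1))) then (1 : Int) else 0 := by
    intro t ht
    rw [List.mem_range] at ht
    simp only [Function.comp]
    have h1 : (1 : Int) + (t : Int) - 1 = ((t : Nat) : Int) := by ring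
    have h2 : (cs.length : Int) - 1 - ((1 : Int) + (t : Int)) = ((cs.length - 2 - t : Nat) : Int) := by
      rw [show cs.length - 2 - t = cs.length - (2 + t) by omega, Nat.cast_sub (by omega)]
      push_cast
      ring
    rw [h1, h2, PySem.List.pyGetD_natCast, PySem.List.pyGetD_natCast]
    rw [List.getD_eq_getElem _ _ (by simpa using by omega : t < ((List.range cs.length).map
      (fun t => ((dcount (cs.take (t + 1))) : Int))).length)]
    rw [List.getD_eq_getElem _ _ (by simpa using by omega : cs.length - 2 - t < ((List.range cs.length).map
      (fun t => ((dcount (cs.reverse.take (t + 1))) : Int))).length)]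
    simp only [List.getElem_map, List.getElem_range]
    have htake : cs.reverse.take (cs.length - 2 - t + 1) = (cs.drop (t + 1)).reverse := by
      have := List.reverse_take (l := cs.reverse) (i := cs.length - 2 - t + 1)
      rw [List.reverse_reverse, List.length_reverse] at this
      rw [← List.reverse_reverse (cs.reverse.take (cs.length - 2 - t + 1)), this]
      congr 1
      congr 1
      omega
    rw [htake, dcount_reverse]
    by_cases hgood : dcount (cs.take (t + 1)) = dcount (cs.drop (t + 1))
    · rw [if_pos (by exact_mod_cast congrArg (Nat.cast : Nat → Int) hgood), if_pos (by simp [hgood])]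
    · rw [if_neg (fun hc => hgood (by exact_mod_cast hc)), if_neg (by simp [hgood])]
  rw [List.map_congr_left hmap]
  rw [show (fun t => if decide (dcount (cs.take (t + 1)) = dcount (cs.drop (t + 1)))
      then (1 : Int) else 0) = (fun t => if (fun u => decide (dcount (cs.take (u + 1))
      = dcount (cs.drop (u + 1)))) t = true then (1 : Int) else 0) from by funext t; simp]
  rw [PySem.List.sum_map_ite_one_zero]
  unfold cntAbove
  congr 1
  rw [show cs.length = (cs.length - 1) + 1 by omega, List.range_succ_eq_map]
  rw [show ((cs.length - 1 + 1) - 1) = cs.length - 1 by omega]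
  simp only [List.drop_succ_cons, List.drop_zero, List.countP_map]
  rfl

-- ===== VERDICT (by name: the statement is the Claim_ definition above) =====
theorem solution_spec : Claim_equal_solution := by
  intro S _
  unfold Spec_solution
  rw [A_eq_cnt, B_eq_cnt]
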